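-- pv_equiv track=rewrite | github.com/nwells157/euchre | bid_logic.py | bid_turn
-- ===== SOURCE A (Python) =====
-- def bid_turn(current_bid, ev, expected_suit, bid_owner, player_turn, trump_suit):
--     # Take current bid and evaluate if expected value is higher
--     # than threshold set (possilby per play for aggressive or passive play)
--
--     bid_array = [2,3,4,5,6] # 5 - Shooter, 6 - Loaner || One less than bid value
--     bid_thresholds = [10,30,40,60,70]
--
--     # need threshold[0] > bid_array[0] to bid 3
--     for i in range(4,0,-1):
--         if ev > bid_thresholds[i]:
--             # Raise bid
--             current_bid += 1
--             bid_owner = player_turn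
--             trump_suit = expected_suit
--             break
--
--     return current_bid, bid_owner, trump_suit
-- ===== SOURCE B (Python) =====
-- def bid_turn(current_bid, ev, expected_suit, bid_owner, player_turn, trump_suit):
--     # The A loop checks thresholds 70,60,40,30 and fires iff any is exceeded,
--     # i.e. iff ev > 30 (the smallest checked threshold).
--     if ev > 30:
--         return current_bid + 1, player_turn, expected_suit
--     return current_bid, bid_owner, trump_suit
-- ===== Notes on version B (the rewrite author's own statement) =====
-- stated objective: simpler
-- what changed: Replaced the reverse for-loop over the threshold array (whose body is index-independent and whose arrays are otherwise unused) with a single closed-form guard ev > 30, the smallest threshold the loop checks.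
import Mathlib
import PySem

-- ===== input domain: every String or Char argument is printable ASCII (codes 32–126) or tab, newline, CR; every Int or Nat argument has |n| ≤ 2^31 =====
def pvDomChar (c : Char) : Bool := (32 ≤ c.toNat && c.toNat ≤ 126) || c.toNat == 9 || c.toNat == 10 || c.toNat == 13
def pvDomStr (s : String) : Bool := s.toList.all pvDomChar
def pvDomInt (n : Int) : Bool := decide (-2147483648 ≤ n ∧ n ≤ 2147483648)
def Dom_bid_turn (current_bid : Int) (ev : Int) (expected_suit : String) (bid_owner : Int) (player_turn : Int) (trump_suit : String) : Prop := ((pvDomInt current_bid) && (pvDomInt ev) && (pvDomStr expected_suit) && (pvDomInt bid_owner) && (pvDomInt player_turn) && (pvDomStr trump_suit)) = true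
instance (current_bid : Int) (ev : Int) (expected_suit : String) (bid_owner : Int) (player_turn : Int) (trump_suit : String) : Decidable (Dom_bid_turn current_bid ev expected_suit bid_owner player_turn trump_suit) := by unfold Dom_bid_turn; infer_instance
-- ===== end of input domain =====

-- ===== PORT A =====
def bidThresholds : List Int := [10, 30, 40, 60, 70]

-- the 'for i in range(4,0,-1)' loop with its break, as structural recursion over the index list
def bidLoop (idxs : List Int) (current_bid : Int) (ev : Int) (expected_suit : String) (bid_owner : Int) (player_turn : Int) (trump_suit : String) : Int × Int × String :=
  match idxs with
  | [] => (current_bid, bid_owner, trump_suit)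
  | i :: rest =>
    if ev > (PySem.List.pyGet? bidThresholds i).getD 0 then  -- indices 1–4 are always in range
      (current_bid + 1, player_turn, expected_suit)          -- raise bid, then break
    else
      bidLoop rest current_bid ev expected_suit bid_owner player_turn trump_suit

def bid_turn (current_bid : Int) (ev : Int) (expected_suit : String) (bid_owner : Int) (player_turn : Int) (trump_suit : String) : Int × Int × String :=
  bidLoop (PySem.List.pyRange 4 0 (-1)) current_bid ev expected_suit bid_owner player_turn trump_suit

-- ===== PORT B =====
-- B: the loop body never depends on i, so it fires iff ev exceeds the smallest checked threshold (30)
def bid_turn_alt (current_bid : Int) (ev : Int) (expected_suit : String) (bid_owner : Int) (player_turn : Int) (trump_suit : String) : Int × Int × String :=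
  if ev > 30 then (current_bid + 1, player_turn, expected_suit)
  else (current_bid, bid_owner, trump_suit)

-- ===== PRECONDITION & SPEC =====
def Spec_bid_turn (current_bid : Int) (ev : Int) (expected_suit : String) (bid_owner : Int) (player_turn : Int) (trump_suit : String) (out : Int × Int × String) : Prop := out = bid_turn_alt current_bid ev expected_suit bid_owner player_turn trump_suit
instance (current_bid : Int) (ev : Int) (expected_suit : String) (bid_owner : Int) (player_turn : Int) (trump_suit : String) (out : Int × Int × String) : Decidable (Spec_bid_turn current_bid ev expected_suit bid_owner player_turn trump_suit out) := by unfold Spec_bid_turn; infer_instance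

-- ===== CLAIM (what is proved, stated in full; the proofs are below) =====
def Claim_equal_bid_turn : Prop := ∀ (current_bid : Int) (ev : Int) (expected_suit : String) (bid_owner : Int) (player_turn : Int) (trump_suit : String), Dom_bid_turn current_bid ev expected_suit bid_owner player_turn trump_suit → Spec_bid_turn current_bid ev expected_suit bid_owner player_turn trump_suit (bid_turn current_bid ev expected_suit bid_owner player_turn trump_suit)

-- ===== LEMMAS AND PROOFS =====

-- ===== VERDICT (by name: the statement is the Claim_ definition above) =====
theorem bid_turn_spec : Claim_equal_bid_turn := by
  intro current_bid ev expected_suit bid_owner player_turn trump_suit _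
  unfold Spec_bid_turn bid_turn bid_turn_alt
  have h : PySem.List.pyRange 4 0 (-1) = [4, 3, 2, 1] := by decide
  rw [h]
  have h4 : (PySem.List.pyGet? bidThresholds 4).getD 0 = 70 := by decide
  have h3 : (PySem.List.pyGet? bidThresholds 3).getD 0 = 60 := by decide
  have h2 : (PySem.List.pyGet? bidThresholds 2).getD 0 = 40 := by decide
  have h1 : (PySem.List.pyGet? bidThresholds 1).getD 0 = 30 := by decide
  simp only [bidLoop, h1, h2, h3, h4]
  split_ifs <;> first | rfl | omega
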